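-- pv_equiv track=rewrite | github.com/DRaborn02/unet-pointcloud-tools | src/remove_isolated_points.py | _find_sparse_voxels
-- ===== SOURCE A (Python) =====
-- def _find_sparse_voxels(voxel_counts, neighbor_offsets, min_neighbors):
--     sparse_voxels = set()
--
--     for vx, vy, vz in voxel_counts.keys():
--         local_count = 0
--         for dx, dy, dz in neighbor_offsets:
--             local_count += voxel_counts.get((vx + dx, vy + dy, vz + dz), 0)
--             if local_count >= min_neighbors:
--                 break
--
--         if local_count < min_neighbors:
--             sparse_voxels.add((vx, vy, vz))
--
--     return sparse_voxels
-- ===== SOURCE B (Python) =====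
-- def _find_sparse_voxels(voxel_counts, neighbor_offsets, min_neighbors):
--     # Scatter pass: each occupied voxel u with count c contributes c to every
--     # voxel v with v + offset == u, i.e. to v = u - offset.
--     neighbor_sums = {}
--     for (ux, uy, uz), c in voxel_counts.items():
--         for dx, dy, dz in neighbor_offsets:
--             t = (ux - dx, uy - dy, uz - dz)
--             neighbor_sums[t] = neighbor_sums.get(t, 0) + c
--     # Scan pass: a voxel is sparse when its accumulated neighborhood sum is low.
--     sparse_voxels = set()
--     for v in voxel_counts.keys():
--         if neighbor_sums.get(v, 0) < min_neighbors:
--             sparse_voxels.add(v)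
--     return sparse_voxels
-- ===== Notes on version B (the rewrite author's own statement) =====
-- stated objective: alternative
-- what changed: B replaces A's gather-per-voxel inner scan (with early break) by a scatter pass that accumulates each voxel's neighborhood sum in one dict, then a single scan over the keys; Pre_ excludes voxel dicts containing a negative count, where A's early break can stop before negative counts cancel the running sum.
import Mathlib
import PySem

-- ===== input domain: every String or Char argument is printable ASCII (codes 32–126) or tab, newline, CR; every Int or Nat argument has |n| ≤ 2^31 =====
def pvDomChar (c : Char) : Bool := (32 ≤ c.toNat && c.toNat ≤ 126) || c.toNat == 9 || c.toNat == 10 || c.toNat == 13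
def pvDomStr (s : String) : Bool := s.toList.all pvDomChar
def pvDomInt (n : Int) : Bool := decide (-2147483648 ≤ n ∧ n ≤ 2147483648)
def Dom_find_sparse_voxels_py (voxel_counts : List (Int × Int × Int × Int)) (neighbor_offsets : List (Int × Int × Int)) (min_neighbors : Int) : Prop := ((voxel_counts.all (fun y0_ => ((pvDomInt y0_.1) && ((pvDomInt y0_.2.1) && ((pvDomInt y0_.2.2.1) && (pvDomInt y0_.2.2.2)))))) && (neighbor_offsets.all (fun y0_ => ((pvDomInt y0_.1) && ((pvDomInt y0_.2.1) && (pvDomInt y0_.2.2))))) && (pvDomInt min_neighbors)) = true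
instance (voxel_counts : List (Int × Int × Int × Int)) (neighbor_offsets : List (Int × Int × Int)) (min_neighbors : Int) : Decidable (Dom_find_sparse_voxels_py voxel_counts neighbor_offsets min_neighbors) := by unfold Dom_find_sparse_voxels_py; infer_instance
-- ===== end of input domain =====

-- ===== PORT A =====
-- B replaces A's per-voxel gather loop by a scatter-then-scan over one accumulator dict (alternative decomposition, same asymptotic cost); Pre_ restricts to nonnegative counts (the natural domain).
-- A's inner 'for dx, dy, dz in neighbor_offsets' loop with the early break:
def pvALoop (d : PySem.Dict (Int × Int × Int) Int) (m : Int)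
    (v : Int × Int × Int) : List (Int × Int × Int) → Int → Int
  | [], c => c
  | off :: rest, c =>
      let c' := c + d.getD (v.1 + off.1, v.2.1 + off.2.1, v.2.2 + off.2.2) 0
      if m ≤ c' then c' else pvALoop d m v rest c'

def find_sparse_voxels_py (voxel_counts : List (Int × Int × Int × Int)) (neighbor_offsets : List (Int × Int × Int)) (min_neighbors : Int) : List (Int × Int × Int) :=
  let d : PySem.Dict (Int × Int × Int) Int :=
    PySem.Dict.ofList (voxel_counts.map (fun p => ((p.1, p.2.1, p.2.2.1), p.2.2.2)))
  d.keys.foldl (fun sparse v =>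
    let local_count := pvALoop d min_neighbors v neighbor_offsets 0
    if local_count < min_neighbors then PySem.Set.add sparse v else sparse)
    PySem.Set.empty

-- ===== PORT B =====
def find_sparse_voxels_py_alt (voxel_counts : List (Int × Int × Int × Int)) (neighbor_offsets : List (Int × Int × Int)) (min_neighbors : Int) : List (Int × Int × Int) :=
  let d : PySem.Dict (Int × Int × Int) Int :=
    PySem.Dict.ofList (voxel_counts.map (fun p => ((p.1, p.2.1, p.2.2.1), p.2.2.2)))
  -- scatter pass: neighbor_sums[u - off] += c
  let neighbor_sums : PySem.Dict (Int × Int × Int) Int :=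
    d.items.foldl (fun a p =>
      neighbor_offsets.foldl (fun a off =>
        a.modify (p.1.1 - off.1, p.1.2.1 - off.2.1, p.1.2.2 - off.2.2) 0 (· + p.2)) a)
      PySem.Dict.empty
  -- scan pass
  d.keys.foldl (fun sparse v =>
    if neighbor_sums.getD v 0 < min_neighbors then PySem.Set.add sparse v else sparse)
    PySem.Set.empty

-- ===== PRECONDITION & SPEC =====
-- Pre_ excludes dicts with a negative voxel count (outside the natural domain of counts): there A's
-- early break can stop the running sum before later negative counts lower it below the threshold.
def Pre_find_sparse_voxels_py (voxel_counts : List (Int × Int × Int × Int)) (neighbor_offsets : List (Int × Int × Int)) (min_neighbors : Int) : Prop :=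
  ∀ p ∈ voxel_counts, 0 ≤ p.2.2.2
instance (voxel_counts : List (Int × Int × Int × Int)) (neighbor_offsets : List (Int × Int × Int)) (min_neighbors : Int) : Decidable (Pre_find_sparse_voxels_py voxel_counts neighbor_offsets min_neighbors) := by unfold Pre_find_sparse_voxels_py; infer_instance

def pvWitness_find_sparse_voxels_py : (List (Int × Int × Int × Int)) × (List (Int × Int × Int)) × Int :=
  ([(0, 0, 0, 1), (1, 0, 0, 2)], [(1, 0, 0), (-1, 0, 0)], 2)

def Spec_find_sparse_voxels_py (voxel_counts : List (Int × Int × Int × Int)) (neighbor_offsets : List (Int × Int × Int)) (min_neighbors : Int) (out : List (Int × Int × Int)) : Prop := out = find_sparse_voxels_py_alt voxel_counts neighbor_offsets min_neighbors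
instance (voxel_counts : List (Int × Int × Int × Int)) (neighbor_offsets : List (Int × Int × Int)) (min_neighbors : Int) (out : List (Int × Int × Int)) : Decidable (Spec_find_sparse_voxels_py voxel_counts neighbor_offsets min_neighbors out) := by unfold Spec_find_sparse_voxels_py; infer_instance

-- ===== CLAIM (what is proved, stated in full; the proofs are below) =====
def Claim_equal_find_sparse_voxels_py : Prop := ∀ (voxel_counts : List (Int × Int × Int × Int)) (neighbor_offsets : List (Int × Int × Int)) (min_neighbors : Int), Dom_find_sparse_voxels_py voxel_counts neighbor_offsets min_neighbors → Pre_find_sparse_voxels_py voxel_counts neighbor_offsets min_neighbors → Spec_find_sparse_voxels_py voxel_counts neighbor_offsets min_neighbors (find_sparse_voxels_py voxel_counts neighbor_offsets min_neighbors)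

-- ===== LEMMAS AND PROOFS =====
-- shorthand facts about the 3-component arithmetic
theorem pv_sub_eq_iff (u v off : Int × Int × Int) :
    ((u.1 - off.1, u.2.1 - off.2.1, u.2.2 - off.2.2) = v) ↔
      (u = (v.1 + off.1, v.2.1 + off.2.1, v.2.2 + off.2.2)) := by
  obtain ⟨a, b, c⟩ := u; obtain ⟨x, y, z⟩ := v
  simp only [Prod.mk.injEq]
  omega

-- a modify-accumulate loop read back at one key: the sum of the matching contributions
theorem pv_getD_modify_sum {α : Type} (l : List α) (k : α → Int × Int × Int) (w : α → Int)
    (d0 : PySem.Dict (Int × Int × Int) Int) (v : Int × Int × Int) :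
    (l.foldl (fun d a => d.modify (k a) 0 (· + w a)) d0).getD v 0
      = d0.getD v 0 + (l.map (fun a => if k a = v then w a else 0)).sum := by
  induction l generalizing d0 with
  | nil => simp
  | cons a l ih =>
    simp only [List.foldl_cons, List.map_cons, List.sum_cons, ih,
      PySem.Dict.getD_modify]
    by_cases h : v = k a
    · subst h; simp; try omega
    · simp only [if_neg h, if_neg (fun hh : k a = v => h hh.symm)]; omega

-- the nested scatter loop of B, read back at one key
theorem pv_scatter (items : List ((Int × Int × Int) × Int)) (offs : List (Int × Int × Int))
    (a0 : PySem.Dict (Int × Int × Int) Int) (v : Int × Int × Int) :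
    (items.foldl (fun a p =>
        offs.foldl (fun a off =>
          a.modify (p.1.1 - off.1, p.1.2.1 - off.2.1, p.1.2.2 - off.2.2) 0 (· + p.2)) a) a0).getD v 0
      = a0.getD v 0 + (items.map (fun p =>
          (offs.map (fun off =>
            if (p.1.1 - off.1, p.1.2.1 - off.2.1, p.1.2.2 - off.2.2) = v then p.2 else 0)).sum)).sum := by
  induction items generalizing a0 with
  | nil => simp
  | cons p items ih =>
    simp only [List.foldl_cons, List.map_cons, List.sum_cons, ih]
    rw [pv_getD_modify_sum offs (fun off => (p.1.1 - off.1, p.1.2.1 - off.2.1, p.1.2.2 - off.2.2))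
      (fun _ => p.2) a0 v]
    omega

-- exchange of the two finite sums
theorem pv_sum_comm {α β : Type} (l1 : List α) (l2 : List β) (f : α → β → Int) :
    (l1.map (fun a => (l2.map (f a)).sum)).sum
      = (l2.map (fun b => (l1.map (fun a => f a b)).sum)).sum := by
  induction l1 with
  | nil => simp [List.sum_eq_zero]
  | cons a l1 ih =>
    simp only [List.map_cons, List.sum_cons, ih, List.sum_map_add]

theorem pv_sum_ite_zero (l : List ((Int × Int × Int) × Int)) (k : Int × Int × Int)
    (h : ∀ p ∈ l, p.1 ≠ k) :
    (l.map (fun p => if p.1 = k then p.2 else 0)).sum = 0 := by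
  apply List.sum_eq_zero; intro x hx
  obtain ⟨p, hp, rfl⟩ := List.mem_map.mp hx
  simp [h p hp]

-- reading a dict at a key is summing the (unique) matching item
theorem pv_sum_ite_of_mem (l : List ((Int × Int × Int) × Int)) (k : Int × Int × Int) (w : Int)
    (hmem : (k, w) ∈ l) (hnd : (l.map Prod.fst).Nodup) :
    (l.map (fun p => if p.1 = k then p.2 else 0)).sum = w := by
  induction l with
  | nil => cases hmem
  | cons p l ih =>
    simp only [List.map_cons, List.nodup_cons] at hnd
    rcases List.mem_cons.mp hmem with h1 | h1
    · subst h1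
      rw [List.map_cons, List.sum_cons, pv_sum_ite_zero l k (fun q hq hqk => hnd.1
        (by simpa [← hqk] using List.mem_map_of_mem (f := Prod.fst) hq))]
      simp
    · have hne : p.1 ≠ k := fun hh =>
        hnd.1 (hh ▸ List.mem_map_of_mem h1)
      simp only [List.map_cons, List.sum_cons, if_neg hne]
      rw [ih h1 hnd.2]
      omega

-- reading a dict at a key is summing the (unique) matching item
theorem pv_getD_eq_sum_items (d : PySem.Dict (Int × Int × Int) Int) (hnd : d.keys.Nodup)
    (k : Int × Int × Int) :
    d.getD k 0 = (d.items.map (fun p => if p.1 = k then p.2 else 0)).sum := by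
  have hnd' : (d.items.map Prod.fst).Nodup := hnd
  cases hg : d.get? k with
  | none =>
    rw [PySem.Dict.getD_eq_get?_getD, hg, Option.getD_none]
    have hk : k ∉ d.keys := (PySem.Dict.get?_eq_none_iff_not_mem_keys d k).mp hg
    refine (pv_sum_ite_zero _ _ ?_).symm
    intro p hp hpk
    exact hk (hpk ▸ List.mem_map_of_mem hp)
  | some w =>
    rw [PySem.Dict.getD_eq_get?_getD, hg, Option.getD_some]
    exact (pv_sum_ite_of_mem d.items k w
      (PySem.Dict.mem_items_of_get?_eq_some d hg) hnd').symm

-- the dict built from a list of nonnegative counts has nonnegative lookups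
theorem pv_getD_foldl_insert_nonneg (l : List ((Int × Int × Int) × Int))
    (d0 : PySem.Dict (Int × Int × Int) Int)
    (h0 : ∀ q, 0 ≤ d0.getD q 0) (h : ∀ p ∈ l, 0 ≤ p.2) (q : Int × Int × Int) :
    0 ≤ (l.foldl (fun d p => d.insert p.1 p.2) d0).getD q 0 := by
  induction l generalizing d0 with
  | nil => exact h0 q
  | cons p l ih =>
    refine ih _ (fun r => ?_) (fun p hp => h p (List.mem_cons_of_mem _ hp))
    rw [PySem.Dict.getD_insert]
    split_ifs
    · exact h p (List.mem_cons_self ..)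
    · exact h0 r

-- A's inner loop with early break, compared with the threshold, equals the full sum compared
-- with the threshold, provided every neighborhood lookup is nonnegative
theorem pv_aloop_iff (d : PySem.Dict (Int × Int × Int) Int) (m : Int) (v : Int × Int × Int)
    (offs : List (Int × Int × Int))
    (hnn : ∀ off ∈ offs, 0 ≤ d.getD (v.1 + off.1, v.2.1 + off.2.1, v.2.2 + off.2.2) 0)
    (c : Int) :
    (pvALoop d m v offs c < m ↔
      c + (offs.map (fun off => d.getD (v.1 + off.1, v.2.1 + off.2.1, v.2.2 + off.2.2) 0)).sum < m) := by
  induction offs generalizing c with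
  | nil => simp [pvALoop]
  | cons off offs ih =>
    simp only [pvALoop, List.map_cons, List.sum_cons]
    have hrest : 0 ≤ (offs.map (fun off => d.getD (v.1 + off.1, v.2.1 + off.2.1, v.2.2 + off.2.2) 0)).sum := by
      apply List.sum_nonneg
      intro x hx
      obtain ⟨o, ho, rfl⟩ := List.mem_map.mp hx
      exact hnn o (List.mem_cons_of_mem _ ho)
    split_ifs with hbr
    · constructor
      · intro h; omega
      · intro h; omega
    · rw [ih (fun o ho => hnn o (List.mem_cons_of_mem _ ho))]
      omega

-- ===== VERDICT (by name: the statement is the Claim_ definition above) =====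
theorem find_sparse_voxels_py_spec : Claim_equal_find_sparse_voxels_py := by
  intro vc offs m _hdom hpre
  unfold Spec_find_sparse_voxels_py
  simp only [find_sparse_voxels_py, find_sparse_voxels_py_alt]
  set d : PySem.Dict (Int × Int × Int) Int :=
    PySem.Dict.ofList (vc.map (fun p => ((p.1, p.2.1, p.2.2.1), p.2.2.2))) with hd
  have hnn : ∀ q, 0 ≤ d.getD q 0 := by
    intro q
    rw [hd]
    apply pv_getD_foldl_insert_nonneg
    · intro r; simp
    · intro p hp
      obtain ⟨p0, hp0, rfl⟩ := List.mem_map.mp hp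
      exact hpre p0 hp0
  have hnd : d.keys.Nodup := PySem.Dict.nodup_keys_ofList _
  congr 1
  funext sparse v
  refine if_congr ?_ rfl rfl
  rw [pv_aloop_iff d m v offs (fun off _ => hnn _) 0,
      pv_scatter d.items offs PySem.Dict.empty v]
  have hacc :
      (d.items.map (fun p =>
          (offs.map (fun off =>
            if (p.1.1 - off.1, p.1.2.1 - off.2.1, p.1.2.2 - off.2.2) = v then p.2 else 0)).sum)).sum
        = (offs.map (fun off => d.getD (v.1 + off.1, v.2.1 + off.2.1, v.2.2 + off.2.2) 0)).sum := by
    rw [pv_sum_comm d.items offs (fun p off =>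
      if (p.1.1 - off.1, p.1.2.1 - off.2.1, p.1.2.2 - off.2.2) = v then p.2 else 0)]
    refine congrArg List.sum (List.map_congr_left ?_)
    intro off _
    rw [pv_getD_eq_sum_items d hnd (v.1 + off.1, v.2.1 + off.2.1, v.2.2 + off.2.2)]
    refine congrArg List.sum (List.map_congr_left ?_)
    intro p _
    exact if_congr (pv_sub_eq_iff p.1 v off) rfl rfl
  rw [hacc]
  simp only [PySem.Dict.getD_empty]
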